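-- pv_equiv track=rewrite | github.com/catrozier08-gif/rozier-quantum | rozier/qubit_health.py | _status_from_codes
-- ===== SOURCE A (Python) =====
-- def _status_from_codes(codes):
--     """
--     Priority:
--         critical -> Q-001 or Q-002
--         warning  -> Q-003 or Q-004
--         idle     -> Q-005 only
--         healthy  -> no codes
--     """
--     code_ids = {c["code"] for c in codes}
--
--     if "Q-001" in code_ids or "Q-002" in code_ids:
--         return "critical"
--     if "Q-003" in code_ids or "Q-004" in code_ids:
--         return "warning"
--     if "Q-005" in code_ids:
--         return "idle"
--     return "healthy"
-- ===== SOURCE B (Python) =====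
-- _RANK = {"Q-001": 0, "Q-002": 0, "Q-003": 1, "Q-004": 1, "Q-005": 2}
-- _LEVELS = ("critical", "warning", "idle", "healthy")
--
-- def _status_from_codes(codes):
--     best = 3
--     for c in codes:
--         best = min(best, _RANK.get(c["code"], 3))
--     return _LEVELS[best]
-- ===== Notes on version B (the rewrite author's own statement) =====
-- stated objective: alternative
-- what changed: Replaced the build-a-set-then-ordered-membership-if-chain with a single min-reducing pass over a severity rank table, indexing a level name list by the minimum rank.
import Mathlib
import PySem

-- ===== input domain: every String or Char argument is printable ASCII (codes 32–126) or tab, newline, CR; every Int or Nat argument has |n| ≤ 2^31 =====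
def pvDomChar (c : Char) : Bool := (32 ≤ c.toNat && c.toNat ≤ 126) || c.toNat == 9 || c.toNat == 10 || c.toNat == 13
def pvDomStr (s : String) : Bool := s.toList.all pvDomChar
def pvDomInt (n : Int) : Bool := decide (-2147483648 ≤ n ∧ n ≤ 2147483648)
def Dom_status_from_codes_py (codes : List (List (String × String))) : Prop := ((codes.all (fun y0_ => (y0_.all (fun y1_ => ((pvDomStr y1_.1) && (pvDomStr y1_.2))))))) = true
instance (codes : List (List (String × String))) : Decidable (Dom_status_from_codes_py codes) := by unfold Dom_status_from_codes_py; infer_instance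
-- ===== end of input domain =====

-- B replaces A's set-building + ordered membership if-chain by one min-reducing pass over a
-- severity rank table, then indexes a level-name list; same O(n) cost (objective: alternative).

-- ===== PORT A =====
-- c["code"]: first-match lookup in the dict c (none = KeyError)
def pvGetCode (c : List (String × String)) : Option String :=
  PySem.Dict.get? (PySem.Dict.mk c) "code"

-- the set comprehension {c["code"] for c in codes}; none if some lookup raises KeyError
def pvCodeIds (codes : List (List (String × String))) : Option (PySem.Set String) :=
  codes.foldl (fun acc c =>
    match acc, pvGetCode c with
    | some s, some v => some (PySem.Set.add s v)
    | _, _ => none) (some PySem.Set.empty)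

def status_from_codes_py (codes : List (List (String × String))) : String :=
  match pvCodeIds codes with
  | none => ""  -- KeyError: excluded by Pre_
  | some codeIds =>
    if PySem.Set.contains codeIds "Q-001" || PySem.Set.contains codeIds "Q-002" then "critical"
    else if PySem.Set.contains codeIds "Q-003" || PySem.Set.contains codeIds "Q-004" then "warning"
    else if PySem.Set.contains codeIds "Q-005" then "idle"
    else "healthy"

-- ===== PORT B =====
def pvRankTable : PySem.Dict String Int :=
  PySem.Dict.mk [("Q-001", 0), ("Q-002", 0), ("Q-003", 1), ("Q-004", 1), ("Q-005", 2)]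

def pvLevels : List String := ["critical", "warning", "idle", "healthy"]

def status_from_codes_py_alt (codes : List (List (String × String))) : String :=
  match codes.foldl (fun acc c =>
      match acc, pvGetCode c with
      | some best, some v => some (min best (PySem.Dict.getD pvRankTable v 3))
      | _, _ => none) (some (3 : Int)) with
  | none => ""  -- KeyError: excluded by Pre_
  | some best => (PySem.List.pyGet? pvLevels best).getD ""

-- ===== PRECONDITION & SPEC =====
-- Pre_ excludes exactly the inputs where some dict lacks the key "code": there Python A
-- (and Python B alike) raises KeyError.
def Pre_status_from_codes_py (codes : List (List (String × String))) : Prop :=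
  ∀ c ∈ codes, (PySem.Dict.mk c).contains "code" = true
instance (codes : List (List (String × String))) : Decidable (Pre_status_from_codes_py codes) := by
  unfold Pre_status_from_codes_py; infer_instance

def pvWitness_status_from_codes_py : (List (List (String × String))) :=
  [[("code", "Q-003")], [("code", "Q-005"), ("msg", "drift")]]

def Spec_status_from_codes_py (codes : List (List (String × String))) (out : String) : Prop := out = status_from_codes_py_alt codes
instance (codes : List (List (String × String))) (out : String) : Decidable (Spec_status_from_codes_py codes out) := by unfold Spec_status_from_codes_py; infer_instance

-- ===== CLAIM (what is proved, stated in full; the proofs are below) =====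
def Claim_equal_status_from_codes_py : Prop := ∀ (codes : List (List (String × String))), Dom_status_from_codes_py codes → Pre_status_from_codes_py codes → Spec_status_from_codes_py codes (status_from_codes_py codes)

-- ===== LEMMAS AND PROOFS =====

-- the list of code ids, in order (defined only under Pre_, where every lookup succeeds)
def pvIds (codes : List (List (String × String))) : List String :=
  codes.map (fun c => (pvGetCode c).getD "")

def pvRankOf (v : String) : Int := PySem.Dict.getD pvRankTable v 3

def pvMinRank (ids : List String) : Int :=
  ids.foldl (fun b v => min b (pvRankOf v)) 3

theorem pvRankOf_cases (v : String) :
    pvRankOf v = if v = "Q-001" then 0 else if v = "Q-002" then 0 else if v = "Q-003" then 1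
      else if v = "Q-004" then 1 else if v = "Q-005" then 2 else 3 := by
  unfold pvRankOf pvRankTable
  by_cases h1 : v = "Q-001" <;> by_cases h2 : v = "Q-002" <;> by_cases h3 : v = "Q-003" <;>
    by_cases h4 : v = "Q-004" <;> by_cases h5 : v = "Q-005" <;>
    subst_vars <;>
    simp_all [PySem.Dict.getD, PySem.Dict.get?, beq_iff_eq, Ne.symm]

theorem pvRankOf_bounds (v : String) : 0 ≤ pvRankOf v ∧ pvRankOf v ≤ 3 := by
  rw [pvRankOf_cases]; split_ifs <;> norm_num

theorem pvFoldA_eq (codes : List (List (String × String)))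
    (h : Pre_status_from_codes_py codes) :
    ∀ s : PySem.Set String,
      codes.foldl (fun acc c =>
        match acc, pvGetCode c with
        | some s, some v => some (PySem.Set.add s v)
        | _, _ => none) (some s)
      = some ((pvIds codes).foldl PySem.Set.add s) := by
  induction codes with
  | nil => intro s; simp [pvIds]
  | cons c cs ih =>
    intro s
    have hc : (pvGetCode c).isSome := by
      rw [pvGetCode, ← PySem.Dict.contains_eq_isSome_get?]
      exact h c List.mem_cons_self
    obtain ⟨v, hv⟩ := Option.isSome_iff_exists.mp hc
    have hpre : Pre_status_from_codes_py cs := fun d hd => h d (List.mem_cons_of_mem _ hd)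
    simp only [List.foldl_cons, hv]
    rw [ih hpre]
    simp [pvIds, hv]

theorem pvFoldB_eq (codes : List (List (String × String)))
    (h : Pre_status_from_codes_py codes) :
    ∀ b : Int,
      codes.foldl (fun acc c =>
        match acc, pvGetCode c with
        | some best, some v => some (min best (PySem.Dict.getD pvRankTable v 3))
        | _, _ => none) (some b)
      = some ((pvIds codes).foldl (fun b v => min b (pvRankOf v)) b) := by
  induction codes with
  | nil => intro b; simp [pvIds]
  | cons c cs ih =>
    intro b
    have hc : (pvGetCode c).isSome := by
      rw [pvGetCode, ← PySem.Dict.contains_eq_isSome_get?]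
      exact h c List.mem_cons_self
    obtain ⟨v, hv⟩ := Option.isSome_iff_exists.mp hc
    have hpre : Pre_status_from_codes_py cs := fun d hd => h d (List.mem_cons_of_mem _ hd)
    simp only [List.foldl_cons, hv]
    rw [ih hpre]
    simp [pvIds, pvRankOf, hv]

theorem pvMinRank_fold (ids : List String) :
    ∀ b : Int, b ≤ 3 →
      ids.foldl (fun b v => min b (pvRankOf v)) b = min b (pvMinRank ids) := by
  induction ids with
  | nil => intro b hb; simp [pvMinRank]; omega
  | cons v vs ih =>
    intro b hb
    have hv := pvRankOf_bounds v
    have h1 : min b (pvRankOf v) ≤ 3 := by omega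
    have h2 : min 3 (pvRankOf v) ≤ 3 := by omega
    have hm : 0 ≤ pvMinRank vs ∧ pvMinRank vs ≤ 3 := by
      constructor
      · unfold pvMinRank
        clear ih h1 h2 hb hv
        have : ∀ (b : Int), 0 ≤ b → 0 ≤ vs.foldl (fun b v => min b (pvRankOf v)) b := by
          induction vs with
          | nil => intro b hb; simpa using hb
          | cons w ws ihw =>
            intro b hb
            have := (pvRankOf_bounds w).1
            exact ihw _ (by simp; omega)
        exact this 3 (by norm_num)
      · unfold pvMinRank
        clear ih h1 h2 hb hv
        have : ∀ (b : Int), b ≤ 3 → vs.foldl (fun b v => min b (pvRankOf v)) b ≤ 3 := by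
          induction vs with
          | nil => intro b hb; simpa using hb
          | cons w ws ihw =>
            intro b hb
            exact ihw _ (by simp; omega)
        exact this 3 (by norm_num)
    have hcons : pvMinRank (v :: vs) = min (pvRankOf v) (pvMinRank vs) := by
      rw [show pvMinRank (v :: vs)
            = vs.foldl (fun b v => min b (pvRankOf v)) (min 3 (pvRankOf v)) from rfl,
         ih _ h2]
      omega
    rw [List.foldl_cons, ih _ h1, hcons]
    omega

theorem pvMinRank_bounds (ids : List String) : 0 ≤ pvMinRank ids ∧ pvMinRank ids ≤ 3 := by
  induction ids with
  | nil => simp [pvMinRank]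
  | cons v vs ih =>
    have hcons : pvMinRank (v :: vs) = min (pvRankOf v) (pvMinRank vs) := by
      have h3 := (pvRankOf_bounds v).2
      rw [show pvMinRank (v :: vs)
            = vs.foldl (fun b v => min b (pvRankOf v)) (min 3 (pvRankOf v)) from rfl,
         pvMinRank_fold vs _ (by omega)]
      omega
    have := pvRankOf_bounds v
    constructor <;> rw [hcons] <;> omega

theorem pvMinRank_le_iff (ids : List String) (k : Int) (hk : k < 3) :
    pvMinRank ids ≤ k ↔ ∃ v ∈ ids, pvRankOf v ≤ k := by
  induction ids with
  | nil => simp [pvMinRank]; omega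
  | cons v vs ih =>
    have hcons : pvMinRank (v :: vs) = min (pvRankOf v) (pvMinRank vs) := by
      have h3 := (pvRankOf_bounds v).2
      rw [show pvMinRank (v :: vs)
            = vs.foldl (fun b v => min b (pvRankOf v)) (min 3 (pvRankOf v)) from rfl,
         pvMinRank_fold vs _ (by omega)]
      omega
    rw [hcons, min_le_iff, ih]
    simp

theorem pvMem_foldl (ids : List String) (x : String) :
    x ∈ ids.foldl PySem.Set.add ([] : PySem.Set String) ↔ x ∈ ids := by
  have h : ids.foldl PySem.Set.add ([] : PySem.Set String) = PySem.Set.ofList ids := by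
    rw [PySem.Set.ofList_eq_foldl]
  rw [h]
  exact PySem.Set.mem_ofList ids x

theorem status_from_codes_py_spec : Claim_equal_status_from_codes_py := by
  intro codes _ hpre
  unfold Spec_status_from_codes_py status_from_codes_py status_from_codes_py_alt pvCodeIds
  rw [pvFoldA_eq codes hpre, pvFoldB_eq codes hpre]
  set ids := pvIds codes with hids
  have hfold : ids.foldl (fun b v => min b (pvRankOf v)) 3 = pvMinRank ids := rfl
  rw [hfold]
  have hb := pvMinRank_bounds ids
  by_cases c1 : "Q-001" ∈ ids ∨ "Q-002" ∈ ids
  · have hm : pvMinRank ids ≤ 0 := by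
      rw [pvMinRank_le_iff ids 0 (by norm_num)]
      rcases c1 with h | h
      · exact ⟨_, h, by rw [pvRankOf_cases]; decide⟩
      · exact ⟨_, h, by rw [pvRankOf_cases]; decide⟩
    have : pvMinRank ids = 0 := by omega
    rw [this]
    rcases c1 with h | h <;> simp [pvMem_foldl, h, pvLevels, PySem.List.pyGet?, PySem.List.pyIdx?]
  · push Not at c1
    by_cases c2 : "Q-003" ∈ ids ∨ "Q-004" ∈ ids
    · have hm : pvMinRank ids ≤ 1 := by
        rw [pvMinRank_le_iff ids 1 (by norm_num)]
        rcases c2 with h | h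
        · exact ⟨_, h, by rw [pvRankOf_cases]; decide⟩
        · exact ⟨_, h, by rw [pvRankOf_cases]; decide⟩
      have hm0 : ¬ pvMinRank ids ≤ 0 := by
        rw [pvMinRank_le_iff ids 0 (by norm_num)]
        rintro ⟨v, hv, hrv⟩
        rw [pvRankOf_cases] at hrv
        split_ifs at hrv <;> subst_vars <;> first
          | exact c1.1 hv | exact c1.2 hv | omega
      have : pvMinRank ids = 1 := by omega
      rw [this]
      rcases c2 with h | h <;>
        simp [pvMem_foldl, h, c1.1, c1.2, pvLevels, PySem.List.pyGet?, PySem.List.pyIdx?]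
    · push Not at c2
      by_cases c3 : "Q-005" ∈ ids
      · have hm : pvMinRank ids ≤ 2 := by
          rw [pvMinRank_le_iff ids 2 (by norm_num)]
          exact ⟨_, c3, by rw [pvRankOf_cases]; decide⟩
        have hm1 : ¬ pvMinRank ids ≤ 1 := by
          rw [pvMinRank_le_iff ids 1 (by norm_num)]
          rintro ⟨v, hv, hrv⟩
          rw [pvRankOf_cases] at hrv
          split_ifs at hrv <;> subst_vars <;> first
            | exact c1.1 hv | exact c1.2 hv | exact c2.1 hv | exact c2.2 hv | omega
        have : pvMinRank ids = 2 := by omega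
        rw [this]
        simp [pvMem_foldl, c3, c1.1, c1.2, c2.1, c2.2, pvLevels, PySem.List.pyGet?, PySem.List.pyIdx?]
      · have hm2 : ¬ pvMinRank ids ≤ 2 := by
          rw [pvMinRank_le_iff ids 2 (by norm_num)]
          rintro ⟨v, hv, hrv⟩
          rw [pvRankOf_cases] at hrv
          split_ifs at hrv <;> subst_vars <;> first
            | exact c1.1 hv | exact c1.2 hv | exact c2.1 hv | exact c2.2 hv | exact c3 hv | omega
        have : pvMinRank ids = 3 := by omega
        rw [this]
        simp [pvMem_foldl, c3, c1.1, c1.2, c2.1, c2.2, pvLevels, PySem.List.pyGet?, PySem.List.pyIdx?]
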